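-- pv_equiv track=rewrite | github.com/GreatPhoenix/DNS-Parser-Problem | DNSproblem.py | findQuestStart
-- ===== SOURCE A (Python) =====
-- def findQuestStart(message,inputIndex):
--     #function finds the start of the question if prevouse statment has alot of padding
--     index = inputIndex//4
--     sizeOfLabel = ''
--     startIndex = 0
--     for i in message[index:]:
--         if i != "0":
--             sizeOfLabel = i
--
--             startIndex = message[index:].index(i)
--             break
--
--     return([startIndex+index,int(sizeOfLabel)])
-- ===== SOURCE B (Python) =====
-- def _stripZeros(labels):
--     # Remove the leading run of "0" entries, structurally.
--     if labels and labels[0] == "0":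
--         return _stripZeros(labels[1:])
--     return labels
--
--
-- def findQuestStart(message, inputIndex):
--     # Strip the "0" padding prefix and recover the position by length difference.
--     index = inputIndex // 4
--     rest = message[index:]
--     stripped = _stripZeros(rest)
--     return [len(rest) - len(stripped) + index, int(stripped[0])]
-- ===== Notes on version B (the rewrite author's own statement) =====
-- stated objective: simpler
-- what changed: B strips the leading run of "0" labels with a small recursive helper and recovers the start position as len(rest) - len(stripped), replacing A's for-loop-with-break plus a second .index() rescan of the slice; Pre_ excludes only the inputs on which A raises ValueError (no non-"0" label after index, so int('') raises, or a first non-"0" label that int() cannot parse).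
import Mathlib
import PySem

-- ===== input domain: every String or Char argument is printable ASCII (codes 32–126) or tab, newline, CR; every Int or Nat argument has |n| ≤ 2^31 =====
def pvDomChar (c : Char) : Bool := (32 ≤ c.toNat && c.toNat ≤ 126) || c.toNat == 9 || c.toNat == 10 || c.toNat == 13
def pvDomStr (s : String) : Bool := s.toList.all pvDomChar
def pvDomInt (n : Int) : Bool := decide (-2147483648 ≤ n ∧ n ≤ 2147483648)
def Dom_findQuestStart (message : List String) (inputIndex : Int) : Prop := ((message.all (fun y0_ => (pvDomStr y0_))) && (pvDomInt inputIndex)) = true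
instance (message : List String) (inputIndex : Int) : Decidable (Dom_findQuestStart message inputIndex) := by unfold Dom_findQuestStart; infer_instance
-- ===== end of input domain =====

-- B strips the leading "0" labels recursively and recovers the position by length
-- difference, replacing A's break-plus-.index() rescan; equal wherever A returns.


-- ===== PORT A =====
-- the for-loop with break: first element ≠ "0" of the slice
def fqsFind : List String → Option String
  | [] => none
  | i :: t => if i ≠ "0" then some i else fqsFind t

def findQuestStart (message : List String) (inputIndex : Int) : List Int :=
  let index := PySem.Int.floordiv inputIndex 4
  let rest := PySem.List.slice message (some index) none
  match fqsFind rest with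
  | some i =>
      -- startIndex = message[index:].index(i); int(sizeOfLabel): none = ValueError, excluded by Pre_
      [((PySem.List.index? rest i).getD 0 : Int) + index, (PySem.Int.ofStr? i).getD 0]
  | none => [0 + index, (PySem.Int.ofStr? "").getD 0]   -- int('') raises ValueError: excluded by Pre_

-- ===== PORT B =====
-- _stripZeros: drop the leading run of "0" entries, structurally
def stripZeros : List String → List String
  | [] => []
  | x :: t => if x == "0" then stripZeros t else x :: t

def findQuestStart_alt (message : List String) (inputIndex : Int) : List Int :=
  let index := PySem.Int.floordiv inputIndex 4
  let rest := PySem.List.slice message (some index) none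
  let stripped := stripZeros rest
  -- stripped[0] raises IndexError when stripped is empty; int(...) none = ValueError: both excluded by Pre_
  [((rest.length : Int) - stripped.length) + index, (PySem.Int.ofStr? (stripped.headD "")).getD 0]

-- ===== PRECONDITION & SPEC =====
-- Pre_ excludes exactly the inputs on which A raises ValueError: the slice has no element ≠ "0"
-- (so int('') raises) or the first such element is not int()-parsable.
def Pre_findQuestStart (message : List String) (inputIndex : Int) : Prop :=
  let stripped := (PySem.List.slice message (some (PySem.Int.floordiv inputIndex 4)) none).dropWhile (fun s => s == "0")
  stripped ≠ [] ∧ (PySem.Int.ofStr? (stripped.headD "")).isSome = true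
instance (message : List String) (inputIndex : Int) : Decidable (Pre_findQuestStart message inputIndex) := by unfold Pre_findQuestStart; infer_instance

def pvWitness_findQuestStart : List String × Int := (["0", "0", "3", "abc"], 2)

def Spec_findQuestStart (message : List String) (inputIndex : Int) (out : List Int) : Prop := out = findQuestStart_alt message inputIndex
instance (message : List String) (inputIndex : Int) (out : List Int) : Decidable (Spec_findQuestStart message inputIndex out) := by unfold Spec_findQuestStart; infer_instance

-- ===== CLAIM (what is proved, stated in full; the proofs are below) =====
def Claim_equal_findQuestStart : Prop := ∀ (message : List String) (inputIndex : Int), Dom_findQuestStart message inputIndex → Pre_findQuestStart message inputIndex → Spec_findQuestStart message inputIndex (findQuestStart message inputIndex)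

-- ===== LEMMAS AND PROOFS =====

-- A's for-loop-with-break finds the head of the "0"-stripped list
theorem fqsFind_eq (r : List String) :
    fqsFind r = (r.dropWhile (fun s => s == "0")).head? := by
  induction r with
  | nil => simp [fqsFind]
  | cons x t ih =>
    rw [fqsFind, List.dropWhile_cons]
    by_cases hx : x = "0" <;> simp [hx, ih]

-- B's recursive strip is dropWhile
theorem stripZeros_eq (r : List String) :
    stripZeros r = r.dropWhile (fun s => s == "0") := by
  induction r with
  | nil => rfl
  | cons x t ih =>
    rw [stripZeros, List.dropWhile_cons]
    by_cases hx : x = "0" <;> simp [hx, ih]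

-- A's .index() rescan lands exactly on the number of leading "0" entries
theorem index?_first (r : List String) (i : String)
    (hi : (r.dropWhile (fun s => s == "0")).head? = some i) :
    PySem.List.index? r i = some (r.takeWhile (fun s => s == "0")).length := by
  induction r with
  | nil => simp at hi
  | cons x t ih =>
    rw [List.dropWhile_cons] at hi
    by_cases hx : x = "0"
    · simp [hx] at hi
      have hne : x ≠ i := by
        rintro rfl
        have := List.head?_dropWhile_not (fun s => s == "0") t
        rw [hi] at this; simp [hx] at this
      rw [PySem.List.index?_cons_of_ne t hne, ih hi]
      simp [hx]
    · simp [hx] at hi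
      subst hi
      rw [PySem.List.index?_cons_self]
      simp [hx]

-- ===== VERDICT (by name: the statement is the Claim_ definition above) =====
theorem findQuestStart_spec : Claim_equal_findQuestStart := by
  intro message inputIndex _ hpre
  obtain ⟨hne, -⟩ := hpre
  unfold Spec_findQuestStart findQuestStart findQuestStart_alt
  simp only []
  set index := PySem.Int.floordiv inputIndex 4 with hidx
  set rest := PySem.List.slice message (some index) none with hrest
  obtain ⟨i, t, hstr⟩ : ∃ i t, rest.dropWhile (fun s => s == "0") = i :: t := by
    cases h : rest.dropWhile (fun s => s == "0") with
    | nil => exact absurd h hne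
    | cons a b => exact ⟨a, b, rfl⟩
  have hfind : fqsFind rest = some i := by rw [fqsFind_eq, hstr]; rfl
  have hindex : PySem.List.index? rest i
      = some (rest.takeWhile (fun s => s == "0")).length :=
    index?_first rest i (by rw [hstr]; rfl)
  have hsz : stripZeros rest = i :: t := by rw [stripZeros_eq, hstr]
  have hlen : (rest.takeWhile (fun s => s == "0")).length
      = rest.length - (stripZeros rest).length := by
    have hsplit := List.takeWhile_append_dropWhile (p := fun s => s == "0") (l := rest)
    have : (rest.takeWhile (fun s => s == "0")).length
        + (rest.dropWhile (fun s => s == "0")).length = rest.length := by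
      rw [← List.length_append, hsplit]
    rw [stripZeros_eq]; omega
  have hle : (stripZeros rest).length ≤ rest.length := by
    rw [stripZeros_eq]; exact (List.length_dropWhile_le _ _)
  rw [hfind]
  simp only [hindex, hsz, Option.getD_some, List.headD_cons]
  rw [hsz] at hlen hle
  congr 2
  omega
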